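-- pv_equiv track=rewrite | github.com/Twprcntmlk/My_Notes | DS&A/String/Unique_Substring.py | solve
-- ===== SOURCE A (Python) =====
-- def solve(s):
--     num = 0
--     bef = ""
--     for i in s:
--         if i != bef:
--             bef = i
--             ans = 1
--         else:
--             ans += 1
--         num += ans
--     return num
-- ===== SOURCE B (Python) =====
-- def solve(s):
--     total = 0
--     i, n = 0, len(s)
--     while i < n:
--         j = i
--         while j < n and s[j] == s[i]:
--             j += 1
--         L = j - i
--         total += L * (L + 1) // 2
--         i = j
--     return total
-- ===== Notes on version B (the rewrite author's own statement) =====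
-- stated objective: alternative
-- what changed: B splits the string into maximal runs of equal characters and adds the closed-form triangular number L*(L+1)//2 per run, instead of A's per-character running counter accumulation.
import Mathlib
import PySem

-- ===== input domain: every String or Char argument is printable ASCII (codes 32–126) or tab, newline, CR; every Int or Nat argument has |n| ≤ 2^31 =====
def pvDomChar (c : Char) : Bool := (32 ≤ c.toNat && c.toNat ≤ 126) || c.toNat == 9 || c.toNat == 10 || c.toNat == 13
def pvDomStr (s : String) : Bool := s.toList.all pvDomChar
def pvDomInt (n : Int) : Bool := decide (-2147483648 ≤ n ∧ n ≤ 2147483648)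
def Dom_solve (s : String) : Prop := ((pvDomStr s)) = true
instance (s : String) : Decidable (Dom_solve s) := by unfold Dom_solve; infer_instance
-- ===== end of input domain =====

-- B replaces A's per-character running-counter accumulation by splitting the string into
-- maximal runs of equal characters and adding the closed form L*(L+1)//2 per run (alternative decomposition).


-- ===== PORT A =====
-- Python's `bef` starts as "" and afterwards always holds the single current character;
-- since "" never equals a one-character string, it is ported exactly as `Option Char` (none = "").
-- Python's `ans` is unassigned before the first iteration; it is first read only after being
-- set to 1 (the first character always differs from ""), so the initial 0 here is never used.
def solveStep (st : Int × Option Char × Int) (i : Char) : Int × Option Char × Int :=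
  let (num, bef, ans) := st
  if some i ≠ bef then (num + 1, some i, 1)
  else (num + (ans + 1), bef, ans + 1)

def solve (s : String) : Int :=
  (s.toList.foldl solveStep ((0 : Int), (none : Option Char), (0 : Int))).1

-- ===== PORT B =====
-- Source B's inner while loop (scan j forward while s[j] == s[i]) is the takeWhile/dropWhile split;
-- the outer while loop is the recursion on the remaining suffix.
def solveRuns : List Char → Int
  | [] => 0
  | c :: rest =>
    let run := rest.takeWhile (fun x => x == c)
    let rest' := rest.dropWhile (fun x => x == c)
    let L : Int := (run.length : Int) + 1
    PySem.Int.floordiv (L * (L + 1)) 2 + solveRuns rest'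
termination_by l => l.length
decreasing_by
  simpa using Nat.lt_succ_of_le (List.length_dropWhile_le _ rest)

def solve_alt (s : String) : Int := solveRuns s.toList

-- ===== PRECONDITION & SPEC =====
def Spec_solve (s : String) (out : Int) : Prop := out = solve_alt s
instance (s : String) (out : Int) : Decidable (Spec_solve s out) := by unfold Spec_solve; infer_instance

-- ===== CLAIM (what is proved, stated in full; the proofs are below) =====
def Claim_equal_solve : Prop := ∀ (s : String), Dom_solve s → Spec_solve s (solve s)

-- ===== LEMMAS AND PROOFS =====

/-- 1 + 2 + ⋯ + k. -/
def sumTo : Nat → Int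
  | 0 => 0
  | k + 1 => sumTo k + (k + 1)

lemma two_mul_sumTo (k : Nat) : 2 * sumTo k = (k : Int) * (k + 1) := by
  induction k with
  | zero => simp [sumTo]
  | succ k ih => simp only [sumTo]; push_cast; push_cast at ih; ring_nf; ring_nf at ih; omega

lemma tri_eq (k : Nat) :
    PySem.Int.floordiv ((k : Int) * ((k : Int) + 1)) 2 = sumTo k := by
  rw [PySem.Int.floordiv_eq_ediv_of_pos (by norm_num), ← two_mul_sumTo k]
  exact Int.mul_ediv_cancel_left _ (by norm_num)

lemma foldl_replicate (k : Nat) (c : Char) (rest : List Char) (num a : Int) :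
    List.foldl solveStep (num, some c, a) (List.replicate k c ++ rest)
      = List.foldl solveStep (num + (k * a + sumTo k), some c, a + k) rest := by
  induction k generalizing num a with
  | zero => simp [sumTo]
  | succ k ih =>
    rw [List.replicate_succ, List.cons_append, List.foldl_cons]
    show List.foldl solveStep (solveStep (num, some c, a) c) _ = _
    rw [show solveStep (num, some c, a) c = (num + (a + 1), some c, a + 1) by
      simp [solveStep]]
    rw [ih]
    congr 2
    · simp only [sumTo]; push_cast; ring
    · push_cast; ring_nf

lemma foldl_fresh : ∀ (n : Nat) (l : List Char), l.length ≤ n →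
    ∀ (num a : Int) (bef : Option Char),
      (∀ c, l.head? = some c → bef ≠ some c) →
      (List.foldl solveStep (num, bef, a) l).1 = num + solveRuns l := by
  intro n
  induction n with
  | zero =>
    intro l hl num a bef _
    have : l = [] := List.eq_nil_of_length_eq_zero (Nat.le_zero.mp hl)
    subst this
    simp [solveRuns]
  | succ n ih =>
    intro l hl num a bef hmis
    match l with
    | [] => simp [solveRuns]
    | c :: rest =>
      rw [List.foldl_cons]
      rw [show solveStep (num, bef, a) c = (num + 1, some c, 1) by
        have := hmis c rfl
        simp [solveStep, Ne.symm this]]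
      have hsplit : rest = List.replicate (rest.takeWhile (fun x => x == c)).length c
          ++ rest.dropWhile (fun x => x == c) := by
        conv_lhs => rw [← List.takeWhile_append_dropWhile (p := fun x => x == c) (l := rest)]
        congr 1
        exact List.eq_replicate_of_mem
          (fun b hb => by simpa using List.mem_takeWhile_imp hb)
      set k := (rest.takeWhile (fun x => x == c)).length with hk
      set rest' := rest.dropWhile (fun x => x == c) with hr
      have hlen : rest'.length ≤ n := by
        have h1 : rest'.length ≤ rest.length := by
          rw [hr]; exact List.length_dropWhile_le _ rest
        simp only [List.length_cons] at hl
        omega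
      have hmis' : ∀ d, rest'.head? = some d → (some c : Option Char) ≠ some d := by
        intro d hd
        have := List.head?_dropWhile_not (fun x => x == c) rest
        rw [← hr, hd] at this
        simp at this ⊢
        exact fun h => this (h ▸ rfl)
      conv_lhs => rw [hsplit]
      rw [foldl_replicate, ih rest' hlen _ _ _ hmis']
      show num + 1 + ((k : Int) * 1 + sumTo k) + solveRuns rest' = num + solveRuns (c :: rest)
      rw [solveRuns]
      simp only [← hk, ← hr]
      rw [show ((k : Int) + 1) * ((k : Int) + 1 + 1) = ((k + 1 : Nat) : Int) * ((k + 1 : Nat) + 1) by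
        push_cast; ring]
      rw [tri_eq (k + 1)]
      simp only [sumTo]
      ring

-- ===== VERDICT (by name: the statement is the Claim_ definition above) =====
theorem solve_spec : Claim_equal_solve := by
  intro s _
  show solve s = solve_alt s
  unfold solve solve_alt
  have := foldl_fresh s.toList.length s.toList le_rfl 0 0 none
    (by intro c _; simp)
  rw [this]
  ring
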